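-- pv_equiv track=rewrite | github.com/jsysunny/Coding | baekjoon_silver.py | find_and_sort_numbers
-- ===== SOURCE A (Python) =====
-- def find_and_sort_numbers(lines):
--     numbers = []
--
--     # 각 줄에서 숫자를 추출
--     for line in lines:
--         num = ""
--         for char in line:
--             if '0' <= char <= '9':
--                 num += char
--             else:
--                 if num:
--                     numbers.append(int(num))
--                     num = ""
--         if num:
--             numbers.append(int(num))
--
--     # 비내림차순으로 정렬
--     numbers.sort()
--
--     return numbers
-- ===== SOURCE B (Python) =====
-- def find_and_sort_numbers(lines):
--     # Join lines with a newline (a non-digit), blank out every non-digit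
--     # character, split on whitespace to get the maximal digit runs, sort.
--     text = "\n".join(lines)
--     tokens = "".join(c if '0' <= c <= '9' else ' ' for c in text).split()
--     return sorted(int(t) for t in tokens)
-- ===== Notes on version B (the rewrite author's own statement) =====
-- stated objective: idiomatic
-- what changed: The hand-written per-character accumulator FSM (with an end-of-line flush) is replaced by a whole-input tokenization: join the lines, map non-digits to spaces, str.split() into digit runs, map int, sorted().
import Mathlib
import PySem

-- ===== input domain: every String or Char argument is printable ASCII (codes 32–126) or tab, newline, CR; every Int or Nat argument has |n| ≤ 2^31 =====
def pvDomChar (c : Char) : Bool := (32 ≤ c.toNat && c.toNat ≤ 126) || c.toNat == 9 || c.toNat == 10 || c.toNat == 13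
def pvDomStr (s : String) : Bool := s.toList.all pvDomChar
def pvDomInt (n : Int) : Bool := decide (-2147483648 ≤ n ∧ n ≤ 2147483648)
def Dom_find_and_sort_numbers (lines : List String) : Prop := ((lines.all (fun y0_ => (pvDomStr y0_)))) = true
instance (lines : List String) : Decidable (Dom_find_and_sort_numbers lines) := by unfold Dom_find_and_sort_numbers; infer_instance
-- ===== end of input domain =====

-- B replaces A's hand-written per-character accumulator FSM by a whole-input
-- tokenization (mask non-digits to spaces, str.split(), map int, sorted); idiomatic, same cost.

-- int(num) on a collected digit run (Python's int() always succeeds there)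
def pyInt (cs : List Char) : Int := (PySem.Int.ofChars? cs).getD 0

-- ===== PORT A =====
-- inner loop body: "if '0' <= char <= '9': num += char / else: if num: append(int(num)); num = ''"
def lineStep (st : List Int × List Char) (c : Char) : List Int × List Char :=
  if '0' ≤ c ∧ c ≤ '9' then (st.1, st.2 ++ [c])
  else if st.2 ≠ [] then (st.1 ++ [pyInt st.2], []) else st

-- one iteration of the outer loop, including the end-of-line "if num: append(int(num))"
def procLine (numbers : List Int) (line : List Char) : List Int :=
  let st := line.foldl lineStep (numbers, [])
  if st.2 ≠ [] then st.1 ++ [pyInt st.2] else st.1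

def find_and_sort_numbers (lines : List String) : List Int :=
  PySem.List.sorted (lines.foldl (fun ns l => procLine ns l.toList) []) (fun x => x) false

-- ===== PORT B =====
-- "c if '0' <= c <= '9' else ' '"
def maskChar (c : Char) : Char := if '0' ≤ c ∧ c ≤ '9' then c else ' '

def find_and_sort_numbers_alt (lines : List String) : List Int :=
  let text := PySem.Chars.join ['\n'] (lines.map (fun s => s.toList))
  let tokens := PySem.Chars.split₀ (text.map maskChar)
  PySem.List.sorted (tokens.map pyInt) (fun x => x) false

-- ===== PRECONDITION & SPEC =====
def Spec_find_and_sort_numbers (lines : List String) (out : List Int) : Prop := out = find_and_sort_numbers_alt lines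
instance (lines : List String) (out : List Int) : Decidable (Spec_find_and_sort_numbers lines out) := by unfold Spec_find_and_sort_numbers; infer_instance

-- ===== CLAIM (what is proved, stated in full; the proofs are below) =====
def Claim_equal_find_and_sort_numbers : Prop := ∀ (lines : List String), Dom_find_and_sort_numbers lines → Spec_find_and_sort_numbers lines (find_and_sort_numbers lines)

-- ===== LEMMAS AND PROOFS =====

theorem isspace_digit (c : Char) (h1 : '0' ≤ c) (h2 : c ≤ '9') : PySem.Chars.isspace c = false := by
  simp only [PySem.Chars.isspace]
  simp only [Char.le_def] at h1 h2
  have b1 : 48 ≤ c.toNat := UInt32.le_iff_toNat_le.mp h1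
  have b2 : c.toNat ≤ 57 := UInt32.le_iff_toNat_le.mp h2
  simp only [Bool.or_eq_false_iff, Bool.and_eq_false_iff, decide_eq_false_iff_not]
  omega

-- split₀.go's token accumulator only grows: it can be factored out in front
theorem go_acc (b : List Char) : ∀ (cur : List Char) (acc : List (List Char)),
    PySem.Chars.split₀.go b cur acc = acc.reverse ++ PySem.Chars.split₀.go b cur [] := by
  induction b with
  | nil => intro cur acc; simp [PySem.Chars.split₀.go]; split_ifs <;> simp
  | cons c rest ih =>
    intro cur acc
    simp only [PySem.Chars.split₀.go]
    split_ifs with h1 h2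
    · exact ih [] acc
    · rw [ih [] (cur.reverse :: acc), ih [] [cur.reverse]]; simp
    · exact ih (c :: cur) acc

-- a single space splits the tokenization
theorem go_split (a : List Char) : ∀ (b cur : List Char) (acc : List (List Char)),
    PySem.Chars.split₀.go (a ++ ' ' :: b) cur acc
      = PySem.Chars.split₀.go a cur acc ++ PySem.Chars.split₀.go b [] [] := by
  induction a with
  | nil =>
    intro b cur acc
    have hs : PySem.Chars.isspace ' ' = true := by decide
    simp only [List.nil_append, PySem.Chars.split₀.go, hs, if_true]
    by_cases hc : cur.isEmpty
    · simp only [if_pos hc]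
      exact go_acc b [] acc
    · simp only [if_neg hc]
      rw [go_acc b [] (cur.reverse :: acc)]
  | cons c rest ih =>
    intro b cur acc
    simp only [List.cons_append, PySem.Chars.split₀.go]
    split_ifs <;> [exact ih b [] acc; exact ih b [] (cur.reverse :: acc); exact ih b (c :: cur) acc]

-- A's per-character FSM computes the int-mapped whitespace tokens of the masked line
theorem fsm_eq (cs : List Char) : ∀ (base : List Int) (pend : List Char) (acc : List (List Char)),
    (let st := cs.foldl lineStep (base ++ acc.reverse.map pyInt, pend)
     if st.2 ≠ [] then st.1 ++ [pyInt st.2] else st.1)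
      = base ++ (PySem.Chars.split₀.go (cs.map maskChar) pend.reverse acc).map pyInt := by
  induction cs with
  | nil =>
    intro base pend acc
    by_cases h : pend = []
    · simp [h, PySem.Chars.split₀.go]
    · simp [h, PySem.Chars.split₀.go, List.isEmpty_iff]
  | cons c rest ih =>
    intro base pend acc
    simp only [List.foldl_cons, List.map_cons, lineStep, maskChar]
    by_cases hd : '0' ≤ c ∧ c ≤ '9'
    · rw [if_pos hd, if_pos hd, PySem.Chars.split₀.go, isspace_digit c hd.1 hd.2]
      simp only [Bool.false_eq_true, if_false]
      have := ih base (pend ++ [c]) acc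
      simpa [List.reverse_append] using this
    · rw [if_neg hd, if_neg hd, PySem.Chars.split₀.go]
      have hs : PySem.Chars.isspace ' ' = true := by decide
      rw [hs, if_pos rfl]
      by_cases hp : pend = []
      · subst hp
        simp only [ne_eq, not_true_eq_false, if_false, List.reverse_nil, List.isEmpty_nil, if_true]
        exact ih base [] acc
      · rw [if_pos hp]
        have hne : ¬(pend.reverse.isEmpty = true) := by simp [List.isEmpty_iff, hp]
        rw [if_neg hne, List.reverse_reverse]
        have := ih base [] (pend :: acc)
        simpa using this

-- one outer-loop iteration, stated against split₀ of the masked line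
theorem procLine_eq (ns : List Int) (cs : List Char) :
    procLine ns cs = ns ++ (PySem.Chars.split₀ (cs.map maskChar)).map pyInt := by
  have := fsm_eq cs ns [] []
  simpa [procLine, PySem.Chars.split₀] using this

-- masking the '\n'-joined lines and splitting = splitting each masked line
theorem mask_join (parts : List (List Char)) :
    PySem.Chars.split₀ ((PySem.Chars.join ['\n'] parts).map maskChar)
      = (parts.map (fun p => PySem.Chars.split₀ (p.map maskChar))).flatten := by
  induction parts with
  | nil => simp [PySem.Chars.join, List.intercalate, PySem.Chars.split₀, PySem.Chars.split₀.go]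
  | cons p ps ih =>
    cases ps with
    | nil => simp [PySem.Chars.join, List.intercalate]
    | cons q ps' =>
      have hj : PySem.Chars.join ['\n'] (p :: q :: ps') = p ++ '\n' :: PySem.Chars.join ['\n'] (q :: ps') := by
        simp [PySem.Chars.join, List.intercalate]
      have hm : maskChar '\n' = ' ' := by decide
      rw [hj]
      simp only [List.map_append, List.map_cons, hm]
      calc PySem.Chars.split₀ ((p.map maskChar) ++ ' ' :: ((PySem.Chars.join ['\n'] (q :: ps')).map maskChar))
          = PySem.Chars.split₀ (p.map maskChar)
            ++ PySem.Chars.split₀ ((PySem.Chars.join ['\n'] (q :: ps')).map maskChar) :=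
            go_split (p.map maskChar) ((PySem.Chars.join ['\n'] (q :: ps')).map maskChar) [] []
        _ = _ := by rw [ih]; simp

-- ===== VERDICT (by name: the statement is the Claim_ definition above) =====
theorem find_and_sort_numbers_spec : Claim_equal_find_and_sort_numbers := by
  intro lines _
  unfold Spec_find_and_sort_numbers find_and_sort_numbers find_and_sort_numbers_alt
  congr 1
  have h1 : lines.foldl (fun ns l => procLine ns l.toList) []
      = lines.foldl (fun ns l => ns ++ (PySem.Chars.split₀ (l.toList.map maskChar)).map pyInt) [] :=
    PySem.List.foldl_congr_mem lines _ _ [] (fun ns l _ => procLine_eq ns l.toList)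
  rw [h1, PySem.List.foldl_append_eq_flatMap, mask_join]
  simp [List.flatMap_def, List.map_flatten, List.map_map, Function.comp_def]
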